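-- pv_equiv track=rewrite | github.com/aseemann/bmspace | bms_optimized.py | chksum_calc
-- ===== SOURCE A (Python) =====
-- def chksum_calc(data):
--     """Calculate checksum for BMS data"""
--     try:
--         chksum = sum(data[1:]) % 65536
--         chksum = '{0:016b}'.format(chksum)
--
--         # Flip bits
--         flip_bits = ''.join('1' if bit == '0' else '0' for bit in chksum)
--
--         chksum = int(flip_bits, 2) + 1
--         return format(chksum, 'X')
--     except Exception as e:
--         return False
-- ===== SOURCE B (Python) =====
-- def chksum_calc(data):
--     """Calculate checksum for BMS data"""
--     # Flipping the 16 bits of c and adding 1 is the two's complement: 65536 - c.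
--     # The hex string is then built digit by digit instead of via format().
--     try:
--         v = 65536 - sum(data[1:]) % 65536
--         out = ""
--         while v:
--             out = "0123456789ABCDEF"[v % 16] + out
--             v //= 16
--         return out
--     except Exception as e:
--         return False
-- ===== Notes on version B (the rewrite author's own statement) =====
-- stated objective: simpler
-- what changed: Replaces the binary-string formatting, per-bit flip comprehension, int(...,2) reparse and format(...,'X') with the two's-complement identity 65536 - sum(data[1:]) % 65536, whose hex string is built digit by digit with a divmod-16 loop.
import Mathlib
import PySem

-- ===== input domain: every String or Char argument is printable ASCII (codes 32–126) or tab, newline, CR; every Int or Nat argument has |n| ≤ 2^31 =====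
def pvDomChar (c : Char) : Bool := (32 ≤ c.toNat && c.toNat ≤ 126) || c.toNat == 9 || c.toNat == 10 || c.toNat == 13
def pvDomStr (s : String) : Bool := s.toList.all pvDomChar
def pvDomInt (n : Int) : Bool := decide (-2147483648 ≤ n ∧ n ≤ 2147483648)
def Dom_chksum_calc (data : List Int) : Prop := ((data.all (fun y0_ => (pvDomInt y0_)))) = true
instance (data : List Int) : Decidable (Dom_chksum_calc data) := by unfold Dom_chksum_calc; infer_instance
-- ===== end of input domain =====

-- B replaces A's format-to-binary / flip-every-bit / reparse / format-hex pipeline by the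
-- two's-complement identity 65536 - c and a hand-rolled back-to-front hex-digit loop
-- (objective: simpler).  On a List Int neither Python ever raises, so the try/except
-- 'return False' branches are dead and both ports are total Strings.

-- ===== PORT A =====
-- format(n, 'X'): uppercase hex, '-' sign for negatives; hand-ported, exact for every Int.
def pvHexDigit (n : Nat) : Char := if n < 10 then Char.ofNat (48 + n) else Char.ofNat (55 + n)

def pvHexChars (n : Nat) : List Char :=
  if _h : n < 16 then [pvHexDigit n]
  else pvHexChars (n / 16) ++ [pvHexDigit (n % 16)]
decreasing_by exact Nat.div_lt_self (by omega) (by omega)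

def pvHex (n : Int) : String :=
  if n < 0 then String.mk ('-' :: pvHexChars (-n).toNat) else String.mk (pvHexChars n.toNat)

-- '{0:016b}'.format(c): binary digits of c zero-padded on the left to width 16;
-- hand-ported (exact for 0 ≤ c, which always holds: c is a mod-65536 residue).
def pvPad16 (bs : List Char) : List Char := List.replicate (16 - bs.length) '0' ++ bs

-- int(s, 2): hand port, exact on nonempty strings made only of '0'/'1' digits (none on '')
-- — the only strings A feeds it: flip_bits maps every character to '0' or '1'.
def pvBinVal? (cs : List Char) : Option Int :=
  if cs.isEmpty then none
  else cs.foldlM (fun a c => if c = '0' then some (2 * a) else if c = '1' then some (2 * a + 1) else none) (0 : Int)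

def chksum_calc (data : List Int) : String :=
  let chksum := PySem.Int.mod (PySem.List.slice data (some 1) none).sum 65536
  let bin := pvPad16 (PySem.Int.toBinChars chksum)
  let flip_bits := bin.map (fun bit => if bit = '0' then '1' else '0')
  -- int(flip_bits, 2) never raises: flip_bits is 16 chars, each '0' or '1' (getD is unreachable)
  let v := (pvBinVal? flip_bits).getD 0 + 1
  pvHex v

-- ===== PORT B =====
-- "0123456789ABCDEF" as a char table, indexed with v % 16 (always in range; getD default unreachable)
def pvDigitTable : List Char :=
  ['0','1','2','3','4','5','6','7','8','9','A','B','C','D','E','F']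

-- the 'while v: out = table[v % 16] + out; v //= 16' loop; v is 65536 - c ≥ 1, a Nat
def pvHexLoop (v : Nat) (out : List Char) : List Char :=
  if v = 0 then out
  else pvHexLoop (v / 16) (pvDigitTable.getD (v % 16) ' ' :: out)
decreasing_by exact Nat.div_lt_self (by omega) (by omega)

def chksum_calc_alt (data : List Int) : String :=
  let v := 65536 - PySem.Int.mod (PySem.List.slice data (some 1) none).sum 65536
  String.mk (pvHexLoop v.toNat [])

-- ===== PRECONDITION & SPEC =====
def Spec_chksum_calc (data : List Int) (out : String) : Prop := out = chksum_calc_alt data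
instance (data : List Int) (out : String) : Decidable (Spec_chksum_calc data out) := by unfold Spec_chksum_calc; infer_instance

-- ===== CLAIM (what is proved, stated in full; the proofs are below) =====
def Claim_equal_chksum_calc : Prop := ∀ (data : List Int), Dom_chksum_calc data → Spec_chksum_calc data (chksum_calc data)

-- ===== LEMMAS AND PROOFS =====

-- value of a '0'/'1' character list read as a binary numeral (proof-side mirror of the folds)
def pvVal (cs : List Char) : Int :=
  cs.foldl (fun a c => 2 * a + (if c = '1' then 1 else 0)) 0

-- the binary fold is linear in its accumulator
theorem pvVal_acc (cs : List Char) : ∀ a : Int,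
    cs.foldl (fun a c => 2 * a + (if c = '1' then 1 else 0)) a
      = a * 2 ^ cs.length + pvVal cs := by
  induction cs with
  | nil => intro a; simp [pvVal]
  | cons c t ih =>
    intro a
    simp only [List.foldl_cons, List.length_cons, pvVal] at *
    rw [ih, ih (2 * 0 + _)]
    ring

theorem pvVal_cons (c : Char) (t : List Char) :
    pvVal (c :: t) = (if c = '1' then 1 else 0) * 2 ^ t.length + pvVal t := by
  simp only [pvVal, List.foldl_cons]
  rw [pvVal_acc]
  simp [pvVal]

-- the fold in pvBinVal? succeeds on pure-bit lists and computes pvVal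
theorem pvBinVal_fold (cs : List Char) : ∀ a : Int, (∀ c ∈ cs, c = '0' ∨ c = '1') →
    cs.foldlM (fun a c => if c = '0' then some (2 * a) else if c = '1' then some (2 * a + 1) else none) a
      = some (cs.foldl (fun a c => 2 * a + (if c = '1' then 1 else 0)) a) := by
  induction cs with
  | nil => intro a _; rfl
  | cons c t ih =>
    intro a h
    have ht : ∀ c ∈ t, c = '0' ∨ c = '1' := fun x hx => h x (by simp [hx])
    rcases h c (by simp) with hc | hc <;> subst hc <;>
      simp [List.foldlM_cons, List.foldl_cons, ih _ ht]

-- flipping every bit complements the value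
theorem pvVal_flip (cs : List Char) (h : ∀ c ∈ cs, c = '0' ∨ c = '1') :
    pvVal (cs.map (fun bit => if bit = '0' then '1' else '0'))
      = 2 ^ cs.length - 1 - pvVal cs := by
  induction cs with
  | nil => simp [pvVal]
  | cons c t ih =>
    have ht := ih (fun x hx => h x (by simp [hx]))
    rcases h c (by simp) with hc | hc <;>
      simp only [hc, List.map_cons, reduceIte, pvVal_cons, List.length_map, List.length_cons,
        ht]
    · rw [if_neg (by decide : ¬ ('0' = '1')), pow_succ]
      ring
    · rw [if_neg (by decide : ¬ ('1' = '0')), if_neg (by decide : ¬ ('0' = '1')), pow_succ]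
      ring

-- a prefix of '0's does not change the value
theorem pvVal_zeros (k : Nat) (cs : List Char) :
    pvVal (List.replicate k '0' ++ cs) = pvVal cs := by
  induction k with
  | zero => simp
  | succ n ih =>
    simp only [List.replicate_succ, List.cons_append, pvVal_cons, if_neg (by decide : ¬ ('0' = '1'))]
    simpa using ih

-- binary digit strings produced by Nat.toDigits 2 are pure bits
theorem toDigits_two_bits (m : Nat) : ∀ c ∈ Nat.toDigits 2 m, c = '0' ∨ c = '1' := by
  induction m using Nat.strong_induction_on with
  | _ m ih =>
    intro c hc
    rw [Nat.toDigits_eq_if (by omega)] at hc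
    by_cases hm : m < 2
    · rw [if_pos hm] at hc
      interval_cases m <;> simp only [List.mem_singleton] at hc <;> subst hc <;> [exact Or.inl rfl; exact Or.inr rfl]
    · rw [if_neg hm] at hc
      rcases List.mem_append.1 hc with hc | hc
      · exact ih (m / 2) (by omega) c hc
      · have h2 : m % 2 < 2 := Nat.mod_lt _ (by omega)
        simp only [List.mem_singleton] at hc
        subst hc
        interval_cases h : m % 2 <;> [exact Or.inl rfl; exact Or.inr rfl]

-- Nat.toDigits 2 m reads back as m
theorem pvVal_toDigits (m : Nat) : pvVal (Nat.toDigits 2 m) = (m : Int) := by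
  induction m using Nat.strong_induction_on with
  | _ m ih =>
    rw [Nat.toDigits_eq_if (by omega)]
    by_cases hm : m < 2
    · interval_cases m <;> decide
    · rw [if_neg hm]
      have h2 : m % 2 < 2 := Nat.mod_lt _ (by omega)
      have hv : pvVal (Nat.toDigits 2 (m / 2)) = ((m / 2 : Nat) : Int) :=
        ih (m / 2) (by omega)
      simp only [pvVal, List.foldl_append] at *
      rw [pvVal_acc, hv]
      interval_cases h : m % 2 <;>
        · simp [pvVal, Nat.digitChar]
          omega

-- the key computation on A's side: parsing the flipped 16-bit padded binary of m gives 65535 - m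
theorem pvKey (m : Nat) (hm : m < 65536) :
    pvBinVal? ((pvPad16 (Nat.toDigits 2 m)).map (fun bit => if bit = '0' then '1' else '0'))
      = some (65535 - (m : Int)) := by
  have hlen : (Nat.toDigits 2 m).length ≤ 16 :=
    (Nat.length_toDigits_le_iff (by omega) (by omega)).2 (by omega)
  have hbits : ∀ c ∈ pvPad16 (Nat.toDigits 2 m), c = '0' ∨ c = '1' := by
    intro c hc
    rcases List.mem_append.1 hc with hc | hc
    · exact Or.inl (List.eq_of_mem_replicate hc)
    · exact toDigits_two_bits m c hc
  have hplen : (pvPad16 (Nat.toDigits 2 m)).length = 16 := by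
    simp [pvPad16]; omega
  have hflipbits : ∀ c ∈ (pvPad16 (Nat.toDigits 2 m)).map (fun bit => if bit = '0' then '1' else '0'),
      c = '0' ∨ c = '1' := by
    intro c hc
    rcases List.mem_map.1 hc with ⟨x, _, hx⟩
    by_cases h0 : x = '0' <;> simp [h0] at hx <;> [exact Or.inr hx.symm; exact Or.inl hx.symm]
  have hne : ¬ ((pvPad16 (Nat.toDigits 2 m)).map (fun bit => if bit = '0' then '1' else '0')).isEmpty := by
    rw [List.isEmpty_iff_length_eq_zero]
    simp [hplen]
  rw [pvBinVal?, if_neg hne, pvBinVal_fold _ 0 hflipbits]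
  have : pvVal ((pvPad16 (Nat.toDigits 2 m)).map (fun bit => if bit = '0' then '1' else '0'))
      = 65535 - (m : Int) := by
    rw [pvVal_flip _ hbits, hplen]
    have : pvVal (pvPad16 (Nat.toDigits 2 m)) = (m : Int) := by
      rw [pvPad16, pvVal_zeros, pvVal_toDigits]
    rw [this]; norm_num
  simpa [pvVal] using congrArg some this

-- the table lookup agrees with A's hex-digit function on every in-range index
theorem pvDigitTable_eq : ∀ k < 16, pvDigitTable.getD k ' ' = pvHexDigit k := by decide

-- B's accumulator loop produces the same digit list as A's append recursion
theorem pvHexLoop_eq (n : Nat) (hn : n ≠ 0) : ∀ acc : List Char,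
    pvHexLoop n acc = pvHexChars n ++ acc := by
  induction n using Nat.strong_induction_on with
  | _ n ih =>
    intro acc
    rw [pvHexLoop, if_neg hn, pvHexChars]
    by_cases h16 : n < 16
    · have h0 : n / 16 = 0 := Nat.div_eq_of_lt h16
      have hm : n % 16 = n := Nat.mod_eq_of_lt h16
      rw [dif_pos h16, h0, pvHexLoop, if_pos rfl, hm,
        pvDigitTable_eq n h16]
      simp
    · have hd : n / 16 ≠ 0 := by
        intro h; exact h16 (by omega)
      rw [dif_neg h16, ih (n / 16) (Nat.div_lt_self (by omega) (by omega)) hd,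
        pvDigitTable_eq (n % 16) (Nat.mod_lt _ (by omega))]
      simp

-- ===== VERDICT (by name: the statement is the Claim_ definition above) =====
theorem chksum_calc_spec : Claim_equal_chksum_calc := by
  intro data _
  unfold Spec_chksum_calc chksum_calc chksum_calc_alt
  simp only []
  set s := (PySem.List.slice data (some 1) none).sum with hs
  have h0 : 0 ≤ PySem.Int.mod s 65536 := PySem.Int.mod_nonneg s (by norm_num)
  have hlt : PySem.Int.mod s 65536 < 65536 := PySem.Int.mod_lt s (by norm_num)
  set c := PySem.Int.mod s 65536 with hc
  have hm : c = ((c.toNat : Nat) : Int) := (Int.toNat_of_nonneg h0).symm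
  have hmlt : c.toNat < 65536 := by omega
  have hbin : PySem.Int.toBinChars c = Nat.toDigits 2 c.toNat := by
    rw [PySem.Int.toBinChars, if_neg (by omega)]
  rw [hbin, pvKey c.toNat hmlt]
  simp only [Option.getD_some]
  have hv : (65535 - ((c.toNat : Nat) : Int)) + 1 = 65536 - c := by omega
  rw [hv, pvHex, if_neg (by omega)]
  have hnz : (65536 - c).toNat ≠ 0 := by omega
  rw [pvHexLoop_eq _ hnz]
  simp
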